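-- pv_equiv track=rewrite | github.com/cfpisaca/IntroToEng | lectures/oct20lecture15.py | f6
-- ===== SOURCE A (Python) =====
-- def f6(plist: list) -> list:
--     words = []
--     for item in plist:
--         if item.count(" ") == 0:
--             words.append(item)
--             # plist.remove(item) will change the len of plist
--     # at this point, words has all words in plist
--     for w in words:
--         plist.remove(w)
--     # at this point plist has only sentences
--     return words + plist
-- ===== SOURCE B (Python) =====
-- def f6(plist: list) -> list:
--     # stable sort: zero-space words (key False) first, sentences after, each group in original order
--     result = sorted(plist, key=lambda x: x.count(" ") != 0)
--     # reproduce A's in-place effect: plist keeps only the sentences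
--     plist[:] = [x for x in plist if x.count(" ") != 0]
--     return result
-- ===== Notes on version B (the rewrite author's own statement) =====
-- stated objective: faster
-- what changed: Replaces the append-then-remove two-loop partition (each plist.remove rescans the list, O(n^2)) by a single stable sort on the boolean key 'contains a space' (words first, sentences after, original order kept), plus one slice assignment reproducing the in-place effect.
import Mathlib
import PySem

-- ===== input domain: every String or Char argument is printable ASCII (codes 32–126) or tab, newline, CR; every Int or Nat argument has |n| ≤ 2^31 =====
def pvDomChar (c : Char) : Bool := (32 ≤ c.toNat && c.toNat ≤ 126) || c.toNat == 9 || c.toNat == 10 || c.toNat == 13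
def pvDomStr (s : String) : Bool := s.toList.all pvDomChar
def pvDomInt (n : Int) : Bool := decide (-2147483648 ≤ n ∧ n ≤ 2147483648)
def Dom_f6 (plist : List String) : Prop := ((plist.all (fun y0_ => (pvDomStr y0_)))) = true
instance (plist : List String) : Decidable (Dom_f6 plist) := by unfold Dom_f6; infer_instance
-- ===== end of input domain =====

-- B replaces A's append-then-remove partition by one stable sort on the key "contains a space";
-- equivalence is about the RETURN value (Source B reproduces A's in-place effect on plist via a slice assignment).

-- ===== PORT A =====
def f6 (plist : List String) : List String :=
  -- words = []; for item in plist: if item.count(" ") == 0: words.append(item)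
  let words := plist.foldl (fun ws item => if PySem.Str.count item " " == 0 then ws ++ [item] else ws) []
  -- for w in words: plist.remove(w)   (each remove always succeeds here: w was taken from plist; getD is the unreachable ValueError branch)
  let plist' := words.foldl (fun l w => (PySem.List.remove? l w).getD l) plist
  words ++ plist'

-- ===== PORT B =====
def f6_alt (plist : List String) : List String :=
  -- sorted(plist, key=lambda x: x.count(" ") != 0)  — stable, False (< True) first
  PySem.List.sorted plist (fun x => PySem.Str.count x " " != 0) false

-- ===== PRECONDITION & SPEC =====
def Spec_f6 (plist : List String) (out : List String) : Prop := out = f6_alt plist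
instance (plist : List String) (out : List String) : Decidable (Spec_f6 plist out) := by unfold Spec_f6; infer_instance

-- ===== CLAIM (what is proved, stated in full; the proofs are below) =====
def Claim_equal_f6 : Prop := ∀ (plist : List String), Dom_f6 plist → Spec_f6 plist (f6 plist)

-- ===== LEMMAS AND PROOFS =====

-- step of A's remove loop threads an element the removed value differs from
theorem remove_step_cons {t : List String} {w x : String} (h : w ≠ x) :
    ((PySem.List.remove? (x :: t) w).getD (x :: t)) = x :: ((PySem.List.remove? t w).getD t) := by
  rw [PySem.List.remove?_cons_of_ne t (by exact fun e => h e.symm)]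
  cases PySem.List.remove? t w <;> simp

-- folding the remove loop over values all different from the head threads the head
theorem remove_fold_cons (ws : List String) (t : List String) (x : String)
    (h : ∀ w ∈ ws, w ≠ x) :
    ws.foldl (fun l w => (PySem.List.remove? l w).getD l) (x :: t)
      = x :: ws.foldl (fun l w => (PySem.List.remove? l w).getD l) t := by
  induction ws generalizing t with
  | nil => rfl
  | cons w ws ih =>
      simp only [List.foldl_cons]
      rw [remove_step_cons (h w (by simp))]
      exact ih _ (fun v hv => h v (by simp [hv]))

-- removing, in order, the p-elements of l from l leaves exactly the non-p elements
theorem remove_fold_filter (p : String → Bool) (l : List String) :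
    (l.filter p).foldl (fun l w => (PySem.List.remove? l w).getD l) l
      = l.filter (fun x => !p x) := by
  induction l with
  | nil => rfl
  | cons x t ih =>
      by_cases hp : p x = true
      · simp only [List.filter_cons, hp, if_pos, List.foldl_cons,
          PySem.List.remove?_cons_self, Option.getD_some, Bool.not_true]
        simpa [hp] using ih
      · have hx : p x = false := by simpa using hp
        simp only [List.filter_cons, hx, Bool.not_false]
        rw [remove_fold_cons _ t x
          (fun w hw => by
            intro e; subst e
            exact hp (List.of_mem_filter hw))]
        simpa [hx] using ih

-- insertBy skips a prefix it does not go before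
theorem insertBy_append_left (before : String → String → Bool) (x : String)
    (F T : List String) (h : ∀ y ∈ F, before x y = false) :
    PySem.List.insertBy before x (F ++ T) = F ++ PySem.List.insertBy before x T := by
  induction F with
  | nil => rfl
  | cons f F ih =>
      simp only [List.cons_append, PySem.List.insertBy, h f (by simp)]
      simp only [Bool.false_eq_true, if_neg, not_false_eq_true]
      rw [ih (fun y hy => h y (by simp [hy]))]

-- insertBy goes in front of a list it goes before everywhere
theorem insertBy_front (before : String → String → Bool) (x : String)
    (T : List String) (h : ∀ y ∈ T, before x y = true) :
    PySem.List.insertBy before x T = x :: T := by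
  cases T with
  | nil => rfl
  | cons y ys => simp [PySem.List.insertBy, h y (by simp)]

-- a stable sort on a Bool key is: the false-key elements, then the true-key elements (each in order)
theorem sorted_bool_key (key : String → Bool) (xs : List String) :
    PySem.List.sorted xs key false
      = xs.filter (fun x => !key x) ++ xs.filter key := by
  rw [PySem.List.sorted_eq_foldl_insertBy]
  suffices h : ∀ (xs F T : List String), (∀ a ∈ F, key a = false) → (∀ a ∈ T, key a = true) →
      xs.foldl (fun acc x => PySem.List.insertBy (fun a b => decide (key a < key b)) x acc) (F ++ T)
        = (F ++ xs.filter (fun x => !key x)) ++ (T ++ xs.filter key) by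
    simpa using h xs [] [] (by simp) (by simp)
  intro xs
  induction xs with
  | nil => intro F T _ _; simp
  | cons x xs ih =>
      intro F T hF hT
      simp only [List.foldl_cons]
      by_cases hk : key x = true
      · rw [PySem.List.insertBy_of_forall_not_before _ x (F ++ T)
          (by intro y hy; simp only [decide_eq_false_iff_not]; intro hlt
              rcases List.mem_append.mp hy with h' | h'
              · rw [hF y h', hk] at hlt; exact absurd hlt (by decide)
              · rw [hT y h', hk] at hlt; exact lt_irrefl _ hlt)]
        rw [List.append_assoc]
        rw [ih F (T ++ [x]) hF (by intro a ha; rcases List.mem_append.mp ha with h' | h'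
                                   · exact hT a h'
                                   · simp_all)]
        simp [hk, List.append_assoc]
      · have hx : key x = false := by simpa using hk
        rw [insertBy_append_left _ x F T
          (by intro y hy; simp [hF y hy, hx])]
        rw [insertBy_front _ x T (by intro y hy; simp [hT y hy, hx])]
        have : F ++ x :: T = (F ++ [x]) ++ T := by simp
        rw [this, ih (F ++ [x]) T
          (by intro a ha; rcases List.mem_append.mp ha with h' | h'
              · exact hF a h'
              · simp_all) hT]
        simp [hx, List.append_assoc]

-- ===== VERDICT (by name: the statement is the Claim_ definition above) =====
theorem f6_spec : Claim_equal_f6 := by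
  intro plist _
  show f6 plist = f6_alt plist
  unfold f6 f6_alt
  simp only []
  rw [sorted_bool_key]
  have hw : plist.foldl
      (fun ws item => if PySem.Str.count item " " == 0 then ws ++ [item] else ws) []
      = plist.filter (fun item => PySem.Str.count item " " == 0) := by
    simpa using PySem.List.foldl_append_if
      (fun item => PySem.Str.count item " " == 0) id plist []
  rw [hw, remove_fold_filter]
  congr 1
  simp [bne, Bool.not_not]
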